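-- pv_equiv track=rewrite | github.com/jetrz/paf-enhancement | decision_node_util.py | split_strands
-- ===== SOURCE A (Python) =====
-- def split_strands(graph_edges, read_strand_dict):
--     pos_edges, neg_edges, cross_strand_edges = set(), set(), set()
--     for edge in graph_edges:
--         src, dst = edge
--         if read_strand_dict[src] == -1 and read_strand_dict[dst] == -1:
--             neg_edges.add(edge)
--         elif read_strand_dict[src] == 1 and read_strand_dict[dst] == 1:
--             pos_edges.add(edge)
--         else:
--             cross_strand_edges.add(edge)
--
--     return pos_edges, neg_edges, cross_strand_edges
-- ===== SOURCE B (Python) =====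
-- def split_strands(graph_edges, read_strand_dict):
--     def sig(edge):
--         return (read_strand_dict[edge[0]], read_strand_dict[edge[1]])
--     pos_edges = {e for e in graph_edges if sig(e) == (1, 1)}
--     neg_edges = {e for e in graph_edges if sig(e) == (-1, -1)}
--     cross_strand_edges = {e for e in graph_edges
--                           if sig(e) != (1, 1) and sig(e) != (-1, -1)}
--     return pos_edges, neg_edges, cross_strand_edges
-- ===== Notes on version B (the rewrite author's own statement) =====
-- stated objective: simpler
-- what changed: Replaces the single loop with branching accumulator updates by three independent filtering set-comprehensions, one per sign class, over the edge list.
-- outside the precondition, e.g. on split_strands({('a', 'b')}, {'a': 2}): A returns (set(), set(), {('a', 'b')}), B raises KeyError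
import Mathlib
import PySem

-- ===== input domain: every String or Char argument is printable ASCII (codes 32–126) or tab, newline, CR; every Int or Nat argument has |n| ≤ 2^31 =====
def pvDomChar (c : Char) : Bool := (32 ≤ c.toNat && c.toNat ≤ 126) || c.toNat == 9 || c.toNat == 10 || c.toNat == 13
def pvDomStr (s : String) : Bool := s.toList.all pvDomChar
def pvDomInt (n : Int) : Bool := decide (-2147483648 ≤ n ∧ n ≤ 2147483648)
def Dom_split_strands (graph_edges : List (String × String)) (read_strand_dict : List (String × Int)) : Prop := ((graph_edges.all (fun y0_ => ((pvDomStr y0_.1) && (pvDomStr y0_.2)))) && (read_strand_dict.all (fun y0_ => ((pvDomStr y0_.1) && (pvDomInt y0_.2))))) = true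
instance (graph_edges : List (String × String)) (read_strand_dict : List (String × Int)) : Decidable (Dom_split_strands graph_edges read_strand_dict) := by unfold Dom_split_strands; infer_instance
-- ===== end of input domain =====

-- B replaces A's single loop with branching accumulator updates by three independent
-- filtering set-comprehensions, one per sign class (objective: simpler).


-- ===== PORT A =====
def split_strands (graph_edges : List (String × String)) (read_strand_dict : List (String × Int)) : (List (String × String)) × (List (String × String)) × (List (String × String)) :=
  let d := PySem.Dict.ofList read_strand_dict
  -- read_strand_dict[src]: KeyError is excluded by Pre_; getD's default is never read there
  graph_edges.foldl
    (fun (st : PySem.Set (String × String) × PySem.Set (String × String) × PySem.Set (String × String)) edge =>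
      if d.getD edge.1 0 == -1 && d.getD edge.2 0 == -1 then
        (st.1, PySem.Set.add st.2.1 edge, st.2.2)
      else if d.getD edge.1 0 == 1 && d.getD edge.2 0 == 1 then
        (PySem.Set.add st.1 edge, st.2.1, st.2.2)
      else
        (st.1, st.2.1, PySem.Set.add st.2.2 edge))
    (PySem.Set.empty, PySem.Set.empty, PySem.Set.empty)

-- ===== PORT B =====
def split_strands_alt (graph_edges : List (String × String)) (read_strand_dict : List (String × Int)) : (List (String × String)) × (List (String × String)) × (List (String × String)) :=
  let d := PySem.Dict.ofList read_strand_dict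
  let sig := fun (e : String × String) => (d.getD e.1 0, d.getD e.2 0)
  (PySem.Set.ofList (graph_edges.filter (fun e => sig e == ((1 : Int), (1 : Int)))),
   PySem.Set.ofList (graph_edges.filter (fun e => sig e == ((-1 : Int), (-1 : Int)))),
   PySem.Set.ofList (graph_edges.filter (fun e => sig e != ((1 : Int), (1 : Int)) && sig e != ((-1 : Int), (-1 : Int)))))

-- ===== PRECONDITION & SPEC =====
-- Pre_ excludes inputs with an edge endpoint missing from read_strand_dict: A raises KeyError there,
-- except when `and` short-circuiting skips the missing dst lookup (src's strand not -1/1), where A still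
-- returns but B's unconditional two-key lookup raises KeyError.
def Pre_split_strands (graph_edges : List (String × String)) (read_strand_dict : List (String × Int)) : Prop :=
  ∀ e ∈ graph_edges, e.1 ∈ read_strand_dict.map Prod.fst ∧ e.2 ∈ read_strand_dict.map Prod.fst
instance (graph_edges : List (String × String)) (read_strand_dict : List (String × Int)) : Decidable (Pre_split_strands graph_edges read_strand_dict) := by unfold Pre_split_strands; infer_instance
def pvWitness_split_strands : (List (String × String)) × (List (String × Int)) :=
  ([("a", "b"), ("b", "b")], [("a", 1), ("b", -1)])

def Spec_split_strands (graph_edges : List (String × String)) (read_strand_dict : List (String × Int)) (out : (List (String × String)) × (List (String × String)) × (List (String × String))) : Prop := out = split_strands_alt graph_edges read_strand_dict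
instance (graph_edges : List (String × String)) (read_strand_dict : List (String × Int)) (out : (List (String × String)) × (List (String × String)) × (List (String × String))) : Decidable (Spec_split_strands graph_edges read_strand_dict out) := by unfold Spec_split_strands; infer_instance

-- ===== CLAIM (what is proved, stated in full; the proofs are below) =====
def Claim_equal_split_strands : Prop := ∀ (graph_edges : List (String × String)) (read_strand_dict : List (String × Int)), Dom_split_strands graph_edges read_strand_dict → Pre_split_strands graph_edges read_strand_dict → Spec_split_strands graph_edges read_strand_dict (split_strands graph_edges read_strand_dict)

-- ===== LEMMAS AND PROOFS =====

-- Folding A's branching step from any triple of accumulators equals folding Set.add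
-- over the three filtered sublists (B's shape).
theorem split_strands_fold_eq (sig : String × String → Int × Int)
    (ge : List (String × String))
    (p n c : PySem.Set (String × String)) :
    ge.foldl
      (fun (st : PySem.Set (String × String) × PySem.Set (String × String) × PySem.Set (String × String)) edge =>
        if (sig edge).1 == -1 && (sig edge).2 == -1 then
          (st.1, PySem.Set.add st.2.1 edge, st.2.2)
        else if (sig edge).1 == 1 && (sig edge).2 == 1 then
          (PySem.Set.add st.1 edge, st.2.1, st.2.2)
        else
          (st.1, st.2.1, PySem.Set.add st.2.2 edge)) (p, n, c)
    = ((ge.filter (fun e => sig e == ((1 : Int), (1 : Int)))).foldl PySem.Set.add p,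
       (ge.filter (fun e => sig e == ((-1 : Int), (-1 : Int)))).foldl PySem.Set.add n,
       (ge.filter (fun e => sig e != ((1 : Int), (1 : Int)) && sig e != ((-1 : Int), (-1 : Int)))).foldl PySem.Set.add c) := by
  induction ge generalizing p n c with
  | nil => simp
  | cons e ge ih =>
    rcases hx : sig e with ⟨x, y⟩
    by_cases h1 : x = 1 ∧ y = 1
    · obtain ⟨rfl, rfl⟩ := h1
      have ih' := ih (PySem.Set.add p e) n c
      simp [List.foldl, hx] at ih' ⊢
      exact ih'
    · by_cases h2 : x = -1 ∧ y = -1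
      · obtain ⟨rfl, rfl⟩ := h2
        have ih' := ih p (PySem.Set.add n e) c
        simp [List.foldl, hx] at ih' ⊢
        exact ih'
      · have ih' := ih p n (PySem.Set.add c e)
        simp [List.foldl, hx, h1, h2, Prod.ext_iff] at ih' ⊢
        exact ih'

-- ===== VERDICT (by name: the statement is the Claim_ definition above) =====
theorem split_strands_spec : Claim_equal_split_strands := by
  intro ge rsd _ _
  unfold Spec_split_strands split_strands split_strands_alt
  rw [split_strands_fold_eq (fun e => ((PySem.Dict.ofList rsd).getD e.1 0, (PySem.Dict.ofList rsd).getD e.2 0)) ge]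
  simp [PySem.Set.ofList_eq_foldl, PySem.Set.empty]
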